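-- pv_equiv track=rewrite | github.com/benquick123/code-profiling | code/batch-2/dn6 - spet tviti/M-17090-1761.py | zadnji_tvit
-- ===== SOURCE A (Python) =====
-- def zadnji_tvit(tviti): #vrne slovar avtorjev in njihovih zadnjih tvitov
--     slovar = {}
--     for tvit in tviti:
--         s = tvit.split()
--         avtor = s[0] #posebej vzamemo avtorja, da se lahko znebimo ':'
--         if avtor[:1] not in slovar: #če se avtor pojavi prvič
--             slovar[avtor[:-1]] = set() #ga doda v slovar
--         slovar[avtor[:-1]] = ' '.join(s[1:]) #in zabeleži njegov zadnji tvit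
--     return slovar
-- ===== SOURCE B (Python) =====
-- def zadnji_tvit(tviti):
--     # Two-phase: extract (author, text) pairs once; then a reverse pass keeping the
--     # FIRST hit (= each author's last tweet) and a dedup pass for key order.
--     pairs = []
--     for t in tviti:
--         s = t.split()
--         pairs.append((s[0][:-1], ' '.join(s[1:])))
--     last = {}
--     for k, v in reversed(pairs):
--         last.setdefault(k, v)
--     return {k: last[k] for k in dict.fromkeys(k for k, _ in pairs)}
-- ===== Notes on version B (the rewrite author's own statement) =====
-- stated objective: alternative
-- what changed: Instead of A's single forward pass that overwrites each author's entry in a dict, B extracts the (author, text) pairs once, walks them in REVERSE keeping the first occurrence via setdefault, and rebuilds the dict over the first-occurrence-deduplicated key order; A's dead `set()` placeholder branch disappears.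
import Mathlib
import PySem

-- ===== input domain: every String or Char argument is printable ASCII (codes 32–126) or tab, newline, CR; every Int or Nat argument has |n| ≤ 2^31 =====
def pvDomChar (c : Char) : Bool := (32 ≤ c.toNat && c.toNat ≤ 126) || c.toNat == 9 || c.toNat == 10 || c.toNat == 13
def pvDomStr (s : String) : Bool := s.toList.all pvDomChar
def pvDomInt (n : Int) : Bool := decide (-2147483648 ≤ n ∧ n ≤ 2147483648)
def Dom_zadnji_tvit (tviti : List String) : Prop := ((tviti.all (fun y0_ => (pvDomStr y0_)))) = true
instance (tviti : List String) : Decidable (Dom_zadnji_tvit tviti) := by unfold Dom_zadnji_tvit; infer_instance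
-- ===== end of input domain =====

-- B replaces A's forward overwrite-last dict pass by pair extraction + a reverse keep-first
-- pass + a rebuild over deduplicated key order (alternative decomposition, same cost).

-- ===== PORT A =====
def zadnji_tvit (tviti : List String) : List (String × String) :=
  (tviti.foldl (fun slovar tvit =>
    let s := PySem.Str.split₀ tvit
    match s with
    | [] => slovar  -- s[0] raises IndexError in Python; outside Pre_
    | avtor :: rest =>
      -- Python writes set() here, but the very next line overwrites the same key
      -- avtor[:-1]; the placeholder value is never observable, ported as "".
      let slovar :=
        if slovar.contains (PySem.Str.slice avtor none (some 1)) = false then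
          slovar.insert (PySem.Str.slice avtor none (some (-1))) ""
        else slovar
      slovar.insert (PySem.Str.slice avtor none (some (-1))) (PySem.Str.join " " rest))
    PySem.Dict.empty).items

-- ===== PORT B =====
def zadnji_tvit_alt (tviti : List String) : List (String × String) :=
  let pairs := tviti.foldl (fun acc t =>
    let s := PySem.Str.split₀ t
    match s with
    | [] => acc  -- s[0] raises IndexError in Python; outside Pre_
    | a :: rest => acc ++ [(PySem.Str.slice a none (some (-1)), PySem.Str.join " " rest)]) []
  let last := pairs.reverse.foldl (fun d p => d.setdefault p.1 p.2)
    (PySem.Dict.empty : PySem.Dict String String)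
  let order := PySem.List.dedup (pairs.map Prod.fst)
  -- last[k] never misses: every key of `order` occurs in `pairs`, hence in `last`.
  (order.foldl (fun d k => d.insert k ((last.get? k).getD "")) PySem.Dict.empty).items

-- ===== PRECONDITION & SPEC =====
-- Pre_ excludes inputs containing a whitespace-only/empty tweet: there s[0] raises
-- IndexError in Python (in A and in B alike).
def Pre_zadnji_tvit (tviti : List String) : Prop := ∀ t ∈ tviti, PySem.Str.split₀ t ≠ []
instance (tviti : List String) : Decidable (Pre_zadnji_tvit tviti) := by
  unfold Pre_zadnji_tvit; infer_instance
def pvWitness_zadnji_tvit : List String := ["ana: hej svet", "bo: hi", "ana: spet jaz"]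

def Spec_zadnji_tvit (tviti : List String) (out : List (String × String)) : Prop := out = zadnji_tvit_alt tviti
instance (tviti : List String) (out : List (String × String)) : Decidable (Spec_zadnji_tvit tviti out) := by unfold Spec_zadnji_tvit; infer_instance

-- ===== CLAIM (what is proved, stated in full; the proofs are below) =====
def Claim_equal_zadnji_tvit : Prop := ∀ (tviti : List String), Dom_zadnji_tvit tviti → Pre_zadnji_tvit tviti → Spec_zadnji_tvit tviti (zadnji_tvit tviti)

-- ===== LEMMAS AND PROOFS =====

/-- The (author, text) pair a nonempty-split tweet contributes. -/
def pvPair? (t : String) : Option (String × String) :=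
  match PySem.Str.split₀ t with
  | [] => none
  | a :: rest => some (PySem.Str.slice a none (some (-1)), PySem.Str.join " " rest)

theorem pvA_eq_insert_fold (tviti : List String)
    (d : PySem.Dict String String) :
    tviti.foldl (fun slovar tvit =>
      match PySem.Str.split₀ tvit with
      | [] => slovar
      | avtor :: rest =>
        let slovar :=
          if slovar.contains (PySem.Str.slice avtor none (some 1)) = false then
            slovar.insert (PySem.Str.slice avtor none (some (-1))) ""
          else slovar
        slovar.insert (PySem.Str.slice avtor none (some (-1))) (PySem.Str.join " " rest)) d
    = (tviti.filterMap pvPair?).foldl (fun d p => d.insert p.1 p.2) d := by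
  induction tviti generalizing d with
  | nil => rfl
  | cons t ts ih =>
    simp only [List.foldl_cons, List.filterMap_cons]
    cases h : PySem.Str.split₀ t with
    | nil =>
      have hp : pvPair? t = none := by simp [pvPair?, h]
      simp only [hp]
      exact ih d
    | cons a rest =>
      have hp : pvPair? t
          = some (PySem.Str.slice a none (some (-1)), PySem.Str.join " " rest) := by
        simp [pvPair?, h]
      simp only [hp, List.foldl_cons]
      rw [ih]
      congr 1
      split_ifs with hc
      · exact PySem.Dict.insert_insert_self _ _ _ _
      · rfl

theorem pvB_pairs_eq (tviti : List String) (acc : List (String × String)) :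
    tviti.foldl (fun acc t =>
      match PySem.Str.split₀ t with
      | [] => acc
      | a :: rest => acc ++ [(PySem.Str.slice a none (some (-1)), PySem.Str.join " " rest)]) acc
    = acc ++ tviti.filterMap pvPair? := by
  induction tviti generalizing acc with
  | nil => simp
  | cons t ts ih =>
    simp only [List.foldl_cons, List.filterMap_cons]
    cases h : PySem.Str.split₀ t with
    | nil =>
      have hp : pvPair? t = none := by simp [pvPair?, h]
      simp only [hp]
      exact ih acc
    | cons a rest =>
      have hp : pvPair? t
          = some (PySem.Str.slice a none (some (-1)), PySem.Str.join " " rest) := by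
        simp [pvPair?, h]
      simp only [hp, ih]
      simp

/-- Forward insert fold looks up the LAST matching pair. -/
theorem pv_get?_insert_fold (P : List (String × String))
    (d : PySem.Dict String String) (k : String) :
    (P.foldl (fun d p => d.insert p.1 p.2) d).get? k
      = ((P.reverse.find? (fun p => p.1 == k)).map Prod.snd).or (d.get? k) := by
  induction P generalizing d with
  | nil => simp
  | cons p rest ih =>
    simp only [List.foldl_cons, List.reverse_cons, ih, List.find?_append]
    cases hf : rest.reverse.find? (fun p => p.1 == k) with
    | some q => simp
    | none =>
      by_cases hk : k = p.1
      · subst hk; simp [PySem.Dict.get?_insert_self]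
      · rw [PySem.Dict.get?_insert_of_ne _ _ hk]
        simp [List.find?_cons, List.find?_nil, beq_iff_eq, Ne.symm hk]

/-- Reverse setdefault fold looks up the FIRST matching pair (of the reversed list). -/
theorem pv_get?_setdefault_fold (L : List (String × String))
    (d : PySem.Dict String String) (k : String) :
    (L.foldl (fun d p => d.setdefault p.1 p.2) d).get? k
      = (d.get? k).or ((L.find? (fun p => p.1 == k)).map Prod.snd) := by
  induction L generalizing d with
  | nil => simp
  | cons p rest ih =>
    simp only [List.foldl_cons]
    rw [ih]
    by_cases hk : p.1 = k
    · subst hk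
      rw [PySem.Dict.get?_setdefault_self]
      cases hd : d.get? p.1 with
      | none => simp [hd]
      | some v => simp [hd]
    · rw [PySem.Dict.get?_setdefault_of_ne _ _ (Ne.symm hk)]
      simp [beq_iff_eq, hk]

theorem pv_main (P : List (String × String)) :
    (P.foldl (fun d p => d.insert p.1 p.2)
        (PySem.Dict.empty : PySem.Dict String String)).items
    = ((PySem.List.dedup (P.map Prod.fst)).foldl (fun d k =>
        d.insert k (((P.reverse.foldl (fun d p => d.setdefault p.1 p.2)
          (PySem.Dict.empty : PySem.Dict String String)).get? k).getD ""))
        PySem.Dict.empty).items := by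
  have hnodup : (P.foldl (fun d p => d.insert p.1 p.2)
      (PySem.Dict.empty : PySem.Dict String String)).keys.Nodup := by
    have := PySem.Dict.nodup_keys_foldl_insert_key P Prod.fst
      (fun _ p => p.2) (PySem.Dict.empty : PySem.Dict String String)
      (by simp)
    simpa using this
  have hkeys : (P.foldl (fun d p => d.insert p.1 p.2)
      (PySem.Dict.empty : PySem.Dict String String)).keys
      = PySem.List.dedup (P.map Prod.fst) := by
    have := PySem.Dict.keys_foldl_insert_key P Prod.fst
      (fun _ p => p.2) (PySem.Dict.empty : PySem.Dict String String)
    simp only [PySem.List.dedup_eq_ofList]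
    simpa [PySem.Dict.keys_empty, PySem.Set.ofList] using this
  have hget : ∀ k, (P.foldl (fun d p => d.insert p.1 p.2)
      (PySem.Dict.empty : PySem.Dict String String)).get? k
      = (P.reverse.foldl (fun d p => d.setdefault p.1 p.2)
          (PySem.Dict.empty : PySem.Dict String String)).get? k := by
    intro k
    rw [pv_get?_insert_fold, pv_get?_setdefault_fold]
    simp
  have hord : (PySem.List.dedup (P.map Prod.fst)).Nodup := by
    simp only [PySem.List.dedup_eq_ofList]; exact PySem.Set.nodup_ofList _
  have hfresh := PySem.Dict.items_foldl_insert_fresh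
      (l := PySem.List.dedup (P.map Prod.fst)) (k := fun k => k)
      (v := fun k => (((P.reverse.foldl (fun d p => d.setdefault p.1 p.2)
        (PySem.Dict.empty : PySem.Dict String String)).get? k).getD ""))
      (d := (PySem.Dict.empty : PySem.Dict String String))
      (by intro a _; simp [PySem.Dict.contains_empty]) (by simpa using hord)
  rw [PySem.Dict.items_eq_map_keys _ hnodup "", hkeys]
  rw [hfresh]
  simp only [PySem.Dict.empty, List.nil_append]
  refine List.map_congr_left (fun k _ => ?_)
  rw [PySem.Dict.getD_eq_get?_getD]
  exact congrArg (fun o => (k, o.getD "")) (hget k)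

-- ===== VERDICT (by name: the statement is the Claim_ definition above) =====
theorem zadnji_tvit_spec : Claim_equal_zadnji_tvit := by
  intro tviti _ _
  unfold Spec_zadnji_tvit zadnji_tvit zadnji_tvit_alt
  rw [pvA_eq_insert_fold, pvB_pairs_eq]
  simpa using pv_main (tviti.filterMap pvPair?)
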